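-- pv_equiv track=rewrite | github.com/sluga1naroda/pythonAlgorithms | 1.array,stack,queue/5.py | minimuminitialqueuelength
-- ===== SOURCE A (Python) =====
-- def minimuminitialqueuelength(sequence):
--     count = 0
--     balance = 0
--
--     for char in sequence.split(' '):
--         if char == '0':
--             balance += 1
--         elif balance == 0:
--             count += 1
--         else:
--             balance -= 1
--
--     return count
-- ===== SOURCE B (Python) =====
-- def minimuminitialqueuelength(sequence):
--     total = 0
--     lowest = 0
--     for token in sequence.split(' '):
--         total += 1 if token == '0' else -1
--         if total < lowest:
--             lowest = total
--     return -lowest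
-- ===== Notes on version B (the rewrite author's own statement) =====
-- stated objective: alternative
-- what changed: Replaces A's three-branch clamped count/balance counters with a single prefix-sum pass that tracks the running total and its minimum, returning the negated minimum prefix deficit.
import Mathlib
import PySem

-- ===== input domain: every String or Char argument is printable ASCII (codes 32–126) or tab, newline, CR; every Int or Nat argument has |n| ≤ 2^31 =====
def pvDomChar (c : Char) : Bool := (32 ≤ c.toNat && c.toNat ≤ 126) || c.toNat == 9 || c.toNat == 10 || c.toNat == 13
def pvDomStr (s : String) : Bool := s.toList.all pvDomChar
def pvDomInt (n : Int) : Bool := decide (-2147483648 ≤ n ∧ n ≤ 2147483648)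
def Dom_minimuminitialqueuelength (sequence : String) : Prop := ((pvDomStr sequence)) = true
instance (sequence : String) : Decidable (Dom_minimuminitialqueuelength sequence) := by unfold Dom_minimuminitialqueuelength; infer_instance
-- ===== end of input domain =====

-- B replaces A's clamped count/balance counters with a minimum-prefix-sum pass (alternative decomposition, same cost).

-- ===== PORT A =====
def minimuminitialqueuelength (sequence : String) : Int :=
  (((PySem.Str.split? sequence " ").getD []).foldl
    (fun (st : Int × Int) ch =>
      if ch = "0" then (st.1, st.2 + 1)
      else if st.2 = 0 then (st.1 + 1, st.2)
      else (st.1, st.2 - 1)) (0, 0)).1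

-- ===== PORT B =====
def minimuminitialqueuelength_alt (sequence : String) : Int :=
  -(((PySem.Str.split? sequence " ").getD []).foldl
    (fun (st : Int × Int) tok =>
      let t := st.1 + (if tok = "0" then 1 else -1)
      (t, if t < st.2 then t else st.2)) (0, 0)).2

-- ===== PRECONDITION & SPEC =====
def Spec_minimuminitialqueuelength (sequence : String) (out : Int) : Prop := out = minimuminitialqueuelength_alt sequence
instance (sequence : String) (out : Int) : Decidable (Spec_minimuminitialqueuelength sequence out) := by unfold Spec_minimuminitialqueuelength; infer_instance

-- ===== CLAIM (what is proved, stated in full; the proofs are below) =====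
def Claim_equal_minimuminitialqueuelength : Prop := ∀ (sequence : String), Dom_minimuminitialqueuelength sequence → Spec_minimuminitialqueuelength sequence (minimuminitialqueuelength sequence)

-- ===== LEMMAS AND PROOFS =====

-- Invariant linking the two folds: balance = total - lowest, count = -lowest,
-- with lowest ≤ 0 and lowest ≤ total.
theorem pv_fold_inv (toks : List String) (count balance total lowest : Int)
    (h1 : balance = total - lowest) (h2 : count = -lowest)
    (h3 : lowest ≤ total) (h4 : lowest ≤ 0) :
    (toks.foldl
      (fun (st : Int × Int) ch =>
        if ch = "0" then (st.1, st.2 + 1)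
        else if st.2 = 0 then (st.1 + 1, st.2)
        else (st.1, st.2 - 1)) (count, balance)).1
    = -(toks.foldl
      (fun (st : Int × Int) tok =>
        let t := st.1 + (if tok = "0" then 1 else -1)
        (t, if t < st.2 then t else st.2)) (total, lowest)).2 := by
  induction toks generalizing count balance total lowest with
  | nil => simpa using by omega
  | cons tok rest ih =>
    simp only [List.foldl_cons]
    by_cases h0 : tok = "0"
    · have hlt : ¬ (total + 1 < lowest) := by omega
      simp only [h0, hlt, if_false, if_true]
      exact ih count (balance + 1) (total + 1) lowest (by omega) h2 (by omega) h4
    · by_cases hb : balance = 0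
      · have hlow : total + -1 < lowest := by omega
        simp only [if_neg h0, hb, hlow, if_true]
        exact ih (count + 1) 0 (total + -1) (total + -1) (by omega) (by omega) (by omega) (by omega)
      · have hge : ¬ (total + -1 < lowest) := by omega
        simp only [if_neg h0, if_neg hb, hge, if_false]
        exact ih count (balance - 1) (total + -1) lowest (by omega) h2 (by omega) h4

-- ===== VERDICT (by name: the statement is the Claim_ definition above) =====
theorem minimuminitialqueuelength_spec : Claim_equal_minimuminitialqueuelength := by
  intro sequence _
  unfold Spec_minimuminitialqueuelength minimuminitialqueuelength minimuminitialqueuelength_alt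
  exact pv_fold_inv _ 0 0 0 0 rfl rfl le_rfl le_rfl
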